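-- pv_equiv track=rewrite | github.com/bakkey3-araumi/git_practice | mathGame.py | provide_hint
-- ===== SOURCE A (Python) =====
-- def provide_hint(secret, guess):
--     secret_str = str(secret)
--     guess_str = str(guess)
--
--     # 各数字の出現回数をカウントするための辞書
--     secret_count = {}
--     guess_count = {}
--
--     # 秘密の数字のカウント
--     for digit in secret_str:
--         if digit in secret_count:
--             secret_count[digit] += 1
--         else:
--             secret_count[digit] = 1
--
--     # ユーザーの入力のカウント
--     for digit in guess_str:
--         if digit in guess_count:
--             guess_count[digit] += 1
--         else:
--             guess_count[digit] = 1
--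
--     # あっている数字の個数を計算
--     correct_count = 0
--     for digit in guess_count:
--         if digit in secret_count:
--             correct_count += min(secret_count[digit], guess_count[digit])
--
--     return f'正解の数字が{correct_count}個含まれています'
-- ===== SOURCE B (Python) =====
-- def provide_hint(secret, guess):
--     # One-pass matching: count the secret's digits once, then consume them
--     # while scanning the guess; no guess counter and no final key loop.
--     remaining = {}
--     for d in str(secret):
--         remaining[d] = remaining.get(d, 0) + 1
--     correct_count = 0
--     for d in str(guess):
--         if remaining.get(d, 0) > 0:
--             correct_count += 1
--             remaining[d] = remaining[d] - 1
--     return f'正解の数字が{correct_count}個含まれています'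
-- ===== Notes on version B (the rewrite author's own statement) =====
-- stated objective: simpler
-- what changed: Instead of building two frequency dictionaries and then summing min-counts over the guess dict's keys, B counts only the secret's characters once and makes a single consuming pass over the guess, decrementing the remaining count and incrementing the match counter on the fly.
import Mathlib
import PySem

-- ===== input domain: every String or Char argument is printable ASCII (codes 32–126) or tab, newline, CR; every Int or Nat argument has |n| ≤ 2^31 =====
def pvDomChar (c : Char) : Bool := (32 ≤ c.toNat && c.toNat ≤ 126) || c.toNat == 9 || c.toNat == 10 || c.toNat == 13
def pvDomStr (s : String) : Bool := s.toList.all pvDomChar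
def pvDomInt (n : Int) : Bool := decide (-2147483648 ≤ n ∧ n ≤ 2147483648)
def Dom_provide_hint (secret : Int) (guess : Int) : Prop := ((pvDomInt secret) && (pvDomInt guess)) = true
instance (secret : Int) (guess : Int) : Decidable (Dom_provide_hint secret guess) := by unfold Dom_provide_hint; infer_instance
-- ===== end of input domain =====

-- B replaces A's two hash counters and final key loop by a single consuming pass over the guess (simpler, one dict, one loop fewer).


-- ===== PORT A =====
def provide_hint (secret : Int) (guess : Int) : String :=
  let secret_str := (PySem.Int.toStr secret).toList
  let guess_str := (PySem.Int.toStr guess).toList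
  -- 'if digit in dict: dict[digit] += 1 else: dict[digit] = 1' over each string
  let secret_count := secret_str.foldl
    (fun d digit => if d.contains digit then d.insert digit (d.getD digit 0 + 1) else d.insert digit 1)
    (PySem.Dict.empty : PySem.Dict Char Int)
  let guess_count := guess_str.foldl
    (fun d digit => if d.contains digit then d.insert digit (d.getD digit 0 + 1) else d.insert digit 1)
    (PySem.Dict.empty : PySem.Dict Char Int)
  -- 'for digit in guess_count: if digit in secret_count: correct += min(...)'
  -- (d[digit] is guarded by 'digit in d' on both dicts, so getD with default 0 is exact here)
  let correct_count := guess_count.keys.foldl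
    (fun acc digit => if secret_count.contains digit then
        acc + min (secret_count.getD digit 0) (guess_count.getD digit 0) else acc)
    (0 : Int)
  "正解の数字が" ++ PySem.Int.toStr correct_count ++ "個含まれています"

-- ===== PORT B =====
def provide_hint_alt (secret : Int) (guess : Int) : String :=
  -- 'remaining[d] = remaining.get(d, 0) + 1' over the secret
  let remaining := (PySem.Int.toStr secret).toList.foldl
    (fun d ch => d.insert ch (d.getD ch 0 + 1)) (PySem.Dict.empty : PySem.Dict Char Int)
  -- one consuming pass over the guess: 'if remaining.get(d,0) > 0: correct += 1; remaining[d] -= 1'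
  let res := (PySem.Int.toStr guess).toList.foldl
    (fun (st : PySem.Dict Char Int × Int) ch =>
      if st.1.getD ch 0 > 0 then (st.1.insert ch (st.1.getD ch 0 - 1), st.2 + 1) else st)
    (remaining, (0 : Int))
  "正解の数字が" ++ PySem.Int.toStr res.2 ++ "個含まれています"

-- ===== PRECONDITION & SPEC =====
def Spec_provide_hint (secret : Int) (guess : Int) (out : String) : Prop := out = provide_hint_alt secret guess
instance (secret : Int) (guess : Int) (out : String) : Decidable (Spec_provide_hint secret guess out) := by unfold Spec_provide_hint; infer_instance

-- ===== CLAIM (what is proved, stated in full; the proofs are below) =====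
def Claim_equal_provide_hint : Prop := ∀ (secret : Int) (guess : Int), Dom_provide_hint secret guess → Spec_provide_hint secret guess (provide_hint secret guess)

-- ===== LEMMAS AND PROOFS =====

-- A's conditional counting step is the unconditional counter step.
theorem pv_astep_eq_counter (s : List Char) :
    s.foldl (fun d digit => if d.contains digit then d.insert digit (d.getD digit 0 + 1)
              else d.insert digit 1) (PySem.Dict.empty : PySem.Dict Char Int)
      = PySem.Dict.counter s := by
  rw [← PySem.Dict.foldl_insert_getD_add_one_eq_counter]
  apply PySem.List.foldl_congr_mem
  intro d x _
  by_cases h : d.contains x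
  · simp [h]
  · simp only [Bool.not_eq_true] at h
    simp [h, PySem.Dict.getD_of_not_contains d 0 h]

-- multiset-intersection facts used by both directions
theorem pv_inter_cons_mem {m t : Multiset Char} {ch : Char} (h : ch ∈ m) :
    m ∩ (ch ::ₘ t) = ch ::ₘ (m.erase ch ∩ t) := by
  ext a
  by_cases ha : a = ch
  · subst ha
    have h1 : 1 ≤ m.count a := Multiset.one_le_count_iff_mem.mpr h
    simp only [Multiset.count_inter, Multiset.count_cons_self, Multiset.count_erase_self]
    omega
  · simp only [Multiset.count_inter, Multiset.count_cons_of_ne ha,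
      Multiset.count_erase_of_ne ha]

theorem pv_inter_cons_not_mem {m t : Multiset Char} {ch : Char} (h : ch ∉ m) :
    m ∩ (ch ::ₘ t) = m ∩ t := by
  ext a
  by_cases ha : a = ch
  · subst ha
    have h0 : m.count a = 0 := Multiset.count_eq_zero.mpr h
    simp only [Multiset.count_inter, Multiset.count_cons_self, h0]
    omega
  · simp only [Multiset.count_inter, Multiset.count_cons_of_ne ha]

-- B's consuming loop computes the cardinality of the multiset intersection.
theorem pv_bloop (g : List Char) : ∀ (d : PySem.Dict Char Int) (s : List Char) (c : Int),
    (∀ ch, d.getD ch 0 = (s.count ch : Int)) →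
    (g.foldl (fun (st : PySem.Dict Char Int × Int) ch =>
        if st.1.getD ch 0 > 0 then (st.1.insert ch (st.1.getD ch 0 - 1), st.2 + 1) else st)
      (d, c)).2 = c + ((((s : Multiset Char)) ∩ ((g : Multiset Char))).card : Int) := by
  induction g with
  | nil => intro d s c _; simp
  | cons ch g' ih =>
    intro d s c hd
    by_cases hpos : d.getD ch 0 > 0
    · have hmem : ch ∈ s := by
        have := hd ch
        rw [this] at hpos
        exact List.count_pos_iff.mp (by exact_mod_cast hpos)
      have hstep : ∀ x, (d.insert ch (d.getD ch 0 - 1)).getD x 0 = ((s.erase ch).count x : Int) := by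
        intro x
        rw [PySem.Dict.getD_insert]
        by_cases hx : x = ch
        · subst hx
          rw [if_pos rfl, hd x, List.count_erase_self]
          have h1 : 1 ≤ s.count x := List.count_pos_iff.mpr hmem
          omega
        · rw [if_neg hx, hd x, List.count_erase_of_ne hx]
      have hcard : ((s : Multiset Char) ∩ ((ch :: g' : List Char) : Multiset Char)).card
          = (( (s.erase ch : List Char) : Multiset Char) ∩ ((g' : List Char) : Multiset Char)).card + 1 := by
        rw [← Multiset.cons_coe, pv_inter_cons_mem (by exact_mod_cast hmem), Multiset.card_cons,
          ← Multiset.coe_erase]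
      simp only [List.foldl_cons, if_pos hpos]
      rw [ih _ (s.erase ch) (c + 1) hstep, hcard]
      push_cast
      ring
    · have hzero : s.count ch = 0 := by
        have := hd ch
        have h0 : (s.count ch : Int) ≤ 0 := by rw [← this]; omega
        exact_mod_cast le_antisymm (by exact_mod_cast h0) (Nat.zero_le _)
      have hnmem : ch ∉ (s : Multiset Char) := by
        rw [Multiset.mem_coe]
        exact fun h => absurd (List.count_pos_iff.mpr h) (by omega)
      have hcard : (s : Multiset Char) ∩ ((ch :: g' : List Char) : Multiset Char)
          = (s : Multiset Char) ∩ ((g' : List Char) : Multiset Char) := by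
        rw [← Multiset.cons_coe, pv_inter_cons_not_mem hnmem]
      simp only [List.foldl_cons, if_neg hpos]
      rw [ih d s c hd, hcard]

-- A's final loop over the guess-counter keys also computes that cardinality.
theorem pv_aloop (s g : List Char) :
    (PySem.Dict.counter g).keys.foldl
      (fun acc digit => if (PySem.Dict.counter s).contains digit then
          acc + min ((PySem.Dict.counter s).getD digit 0) ((PySem.Dict.counter g).getD digit 0) else acc)
      (0 : Int)
    = (((s : Multiset Char) ∩ (g : Multiset Char)).card : Int) := by
  rw [PySem.Dict.keys_counter]
  have h1 : (PySem.Set.ofList g).foldl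
      (fun acc digit => if (PySem.Dict.counter s).contains digit then
          acc + min ((PySem.Dict.counter s).getD digit 0) ((PySem.Dict.counter g).getD digit 0) else acc)
      (0 : Int)
      = (PySem.Set.ofList g).foldl
      (fun acc digit => acc + min ((s.count digit : Int)) ((g.count digit : Int))) (0 : Int) := by
    apply PySem.List.foldl_congr_mem
    intro acc x _
    rw [PySem.Dict.contains_counter, PySem.Dict.getD_counter, PySem.Dict.getD_counter]
    by_cases hx : s.contains x
    · rw [if_pos hx]
    · have h0 : s.count x = 0 := by
        simp only [Bool.not_eq_true] at hx
        exact List.count_eq_zero.mpr (by simpa using hx)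
      rw [if_neg hx, h0]
      have := Int.natCast_nonneg (g.count x)
      omega
  rw [h1, PySem.List.foldl_add, zero_add]
  have hnodup : (PySem.Set.ofList g).Nodup := by
    rw [← PySem.List.dedup_eq_ofList]; exact PySem.List.nodup_dedup g
  rw [← List.sum_toFinset _ hnodup]
  have hfs : (PySem.Set.ofList g).toFinset = g.toFinset := by
    ext a
    simp only [List.mem_toFinset]
    rw [← PySem.List.dedup_eq_ofList, PySem.List.mem_dedup]
  rw [hfs]
  have hcard : (((s : Multiset Char)) ∩ ((g : List Char) : Multiset Char)).card
      = ∑ a ∈ g.toFinset, min (s.count a) (g.count a) := by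
    rw [← Multiset.toFinset_sum_count_eq]
    have hsub : (((s : Multiset Char)) ∩ ((g : List Char) : Multiset Char)).toFinset ⊆ g.toFinset := by
      intro a ha
      rw [Multiset.mem_toFinset] at ha
      rw [List.mem_toFinset]
      exact Multiset.mem_coe.mp (Multiset.mem_inter.mp ha).2
    rw [Finset.sum_subset hsub
      (fun a _ hna => Multiset.count_eq_zero.mpr (by rwa [Multiset.mem_toFinset] at hna))]
    exact Finset.sum_congr rfl (fun a _ => by
      rw [Multiset.count_inter, Multiset.coe_count, Multiset.coe_count])
  rw [hcard]
  push_cast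
  rfl

-- ===== VERDICT (by name: the statement is the Claim_ definition above) =====
theorem provide_hint_spec : Claim_equal_provide_hint := by
  intro secret guess _
  unfold Spec_provide_hint provide_hint provide_hint_alt
  simp only []
  rw [pv_astep_eq_counter, pv_astep_eq_counter, pv_aloop,
    PySem.Dict.foldl_insert_getD_add_one_eq_counter,
    pv_bloop _ _ _ _ (fun ch => PySem.Dict.getD_counter _ ch), zero_add]
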